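-- pv_equiv track=rewrite | github.com/RamazanPython/algs | sprint_4/homework/final_tasks/task_a/task_a.py | find_documents
-- ===== SOURCE A (Python) =====
-- def find_documents(indices: dict, request: str, doc_amount: int) -> list:
--     words = set(request.strip().split())
--     weights = [[i, 0] for i in range(doc_amount + 1)]
--     for word in words:
--         if word not in indices:
--             continue
--
--         documents = indices.get(word, {})
--         for document_num, occurrence in documents.items():
--             weights[document_num][-1] += occurrence
--
--     return weights
-- ===== SOURCE B (Python) =====
-- def find_documents(indices: dict, request: str, doc_amount: int) -> list:
--     words = set(request.strip().split())
--     result = []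
--     for document_num in range(doc_amount + 1):
--         score = sum(
--             occurrence
--             for word in words
--             for num, occurrence in indices.get(word, {}).items()
--             if num == document_num
--         )
--         result.append([document_num, score])
--     return result
-- ===== Notes on version B (the rewrite author's own statement) =====
-- stated objective: alternative
-- what changed: Replaces A's preallocated mutable weights table, updated in place by walking each requested word's posting list, with a per-document outer loop over 0..doc_amount that computes each document's score by scanning the requested words' posting lists and builds the result rows directly.
-- outside the precondition, e.g. on find_documents({'a': {-1: 5}}, 'a', 1): A returns [[0, 0], [1, 5]], B returns [[0, 0], [1, 0]]
import Mathlib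
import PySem

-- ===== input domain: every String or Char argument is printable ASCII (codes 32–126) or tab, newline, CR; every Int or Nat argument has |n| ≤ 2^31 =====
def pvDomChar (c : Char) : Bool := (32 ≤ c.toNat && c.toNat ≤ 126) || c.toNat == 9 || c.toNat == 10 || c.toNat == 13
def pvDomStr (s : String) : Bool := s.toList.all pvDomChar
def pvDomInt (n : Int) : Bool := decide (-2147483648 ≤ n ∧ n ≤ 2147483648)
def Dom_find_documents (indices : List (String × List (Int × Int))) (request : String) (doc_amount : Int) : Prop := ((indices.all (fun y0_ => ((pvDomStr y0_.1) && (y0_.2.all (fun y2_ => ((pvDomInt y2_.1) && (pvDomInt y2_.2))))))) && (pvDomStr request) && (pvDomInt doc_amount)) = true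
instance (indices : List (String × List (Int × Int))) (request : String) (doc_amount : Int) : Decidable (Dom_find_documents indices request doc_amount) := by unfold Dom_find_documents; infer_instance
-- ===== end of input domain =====

-- B replaces A's preallocated mutable score array and posting-list walk by a direct per-document
-- scan of the requested words (objective: alternative decomposition, not faster).

-- ===== PORT A =====
-- helper for A's statement `weights[document_num][-1] += occurrence`
def pvStepA (ws : List (List Int)) (p : Int × Int) : List (List Int) :=
  PySem.List.pySetD ws p.1
    (PySem.List.pySetD (PySem.List.pyGetD ws p.1 [])
      (-1)
      (PySem.List.pyGetD (PySem.List.pyGetD ws p.1 []) (-1) 0 + p.2))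

def find_documents (indices : List (String × List (Int × Int))) (request : String) (doc_amount : Int) : List (List Int) :=
  let words : PySem.Set String := PySem.Set.ofList (PySem.Str.split₀ (PySem.Str.strip request))
  let weights : List (List Int) := (PySem.List.pyRange 0 (doc_amount + 1)).map (fun i => [i, 0])
  words.foldl
    (fun ws word =>
      if !(PySem.Dict.mk indices).contains word then ws
      else
        let documents := (PySem.Dict.mk indices).getD word []
        documents.foldl pvStepA ws)
    weights

-- ===== PORT B =====
def find_documents_alt (indices : List (String × List (Int × Int))) (request : String) (doc_amount : Int) : List (List Int) :=
  let words : PySem.Set String := PySem.Set.ofList (PySem.Str.split₀ (PySem.Str.strip request))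
  (PySem.List.pyRange 0 (doc_amount + 1)).map
    (fun document_num =>
      [document_num,
        words.foldl
          (fun acc word =>
            acc + ((PySem.Dict.mk indices).getD word []).foldl
                (fun s p => if p.1 = document_num then s + p.2 else s) 0)
          0])

-- ===== PRECONDITION & SPEC =====
-- Pre_ excludes inputs where a requested word's stored posting list carries a document number
-- outside [0, doc_amount]: beyond that range A raises IndexError, and for negative numbers A's
-- list indexing counts from the end and credits the occurrence to document doc_amount+1+num,
-- while B (naturally) scores only the documents 0..doc_amount; negative document numbers are
-- outside the natural domain of an inverted index.
def Pre_find_documents (indices : List (String × List (Int × Int))) (request : String) (doc_amount : Int) : Prop :=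
  ∀ word ∈ PySem.Str.split₀ (PySem.Str.strip request),
    ∀ p ∈ (PySem.Dict.mk indices).getD word ([] : List (Int × Int)), 0 ≤ p.1 ∧ p.1 ≤ doc_amount
instance (indices : List (String × List (Int × Int))) (request : String) (doc_amount : Int) : Decidable (Pre_find_documents indices request doc_amount) := by unfold Pre_find_documents; infer_instance

def pvWitness_find_documents : (List (String × List (Int × Int))) × String × Int :=
  ([("a", [(0, 2), (1, 3)]), ("b", [(1, 1)])], "a b a", 1)

def Spec_find_documents (indices : List (String × List (Int × Int))) (request : String) (doc_amount : Int) (out : List (List Int)) : Prop := out = find_documents_alt indices request doc_amount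
instance (indices : List (String × List (Int × Int))) (request : String) (doc_amount : Int) (out : List (List Int)) : Decidable (Spec_find_documents indices request doc_amount out) := by unfold Spec_find_documents; infer_instance

-- ===== CLAIM (what is proved, stated in full; the proofs are below) =====
def Claim_equal_find_documents : Prop := ∀ (indices : List (String × List (Int × Int))) (request : String) (doc_amount : Int), Dom_find_documents indices request doc_amount → Pre_find_documents indices request doc_amount → Spec_find_documents indices request doc_amount (find_documents indices request doc_amount)

-- ===== LEMMAS AND PROOFS =====

-- the total occurrence weight the pair list ps contributes to document i
def pvScore1 (ps : List (Int × Int)) (i : Int) : Int :=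
  (ps.map (fun p => if p.1 = i then p.2 else 0)).sum

-- the total score of document i over the word list ws
def pvScoreW (indices : List (String × List (Int × Int))) (ws : List String) (i : Int) : Int :=
  (ws.map (fun w => pvScore1 ((PySem.Dict.mk indices).getD w []) i)).sum

-- canonical shape of A's weights table
def pvCanon (n : Int) (g : Int → Int) : List (List Int) :=
  (PySem.List.pyRange 0 (n + 1)).map (fun i => [i, g i])

lemma pvScore1_foldl (ps : List (Int × Int)) (i c : Int) :
    ps.foldl (fun s p => if p.1 = i then s + p.2 else s) c = c + pvScore1 ps i := by
  have h : (fun (s : Int) (p : Int × Int) => if p.1 = i then s + p.2 else s)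
      = fun s p => s + (if p.1 = i then p.2 else 0) := by
    funext s p; split <;> simp
  rw [h, pvScore1]
  exact PySem.List.foldl_add ps _ c

lemma pvStepA_canon (n : Int) (g : Int → Int) (d occ : Int) (h0 : 0 ≤ d) (h1 : d < n + 1) :
    pvStepA (pvCanon n g) (d, occ) = pvCanon n (fun i => if i = d then g i + occ else g i) := by
  have hrow : PySem.List.pyGetD (pvCanon n g) d [] = [d, g d] :=
    PySem.List.pyGetD_map_pyRange_of_nonneg (fun i => [i, g i]) (n + 1) d [] h0 h1
  unfold pvStepA
  simp only [hrow]
  rw [show PySem.List.pyGetD [d, g d] (-1) 0 = g d by simp [PySem.List.pyGetD_neg_one],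
    show PySem.List.pySetD [d, g d] (-1) (g d + occ) = [d, g d + occ] by
      simp [PySem.List.pySetD, PySem.List.pySet?, PySem.List.pyIdx?],
    PySem.List.pySetD_of_nonneg _ _ h0]
  unfold pvCanon
  apply List.ext_getElem
  · simp
  · intro k hk1 hk2
    simp only [List.getElem_set, List.getElem_map, PySem.List.getElem_pyRange_one]
    by_cases hkd : k = d.toNat
    · simp [hkd]
      exact ⟨h0, by rw [if_pos h0, max_eq_left h0]⟩
    · rw [if_neg (fun h => hkd h.symm), if_neg (show ¬((0 : Int) + (k : Int) = d) by omega)]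

lemma pvFoldDocs (n : Int) (ps : List (Int × Int)) (g : Int → Int)
    (h : ∀ p ∈ ps, 0 ≤ p.1 ∧ p.1 ≤ n) :
    ps.foldl pvStepA (pvCanon n g) = pvCanon n (fun i => g i + pvScore1 ps i) := by
  induction ps generalizing g with
  | nil => simp [pvScore1]
  | cons hd tl ih =>
    obtain ⟨hd0, hd1⟩ := h hd (by simp)
    rw [List.foldl_cons, show hd = (hd.1, hd.2) from rfl,
      pvStepA_canon n g hd.1 hd.2 hd0 (by omega),
      ih _ (fun p hp => h p (by simp [hp]))]
    unfold pvCanon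
    apply List.map_congr_left
    intro i _
    simp only [pvScore1, List.map_cons, List.sum_cons]
    by_cases hi : i = hd.1
    · simp [hi, eq_comm]
      ring
    · simp [hi, eq_comm]

lemma pvBodyA (indices : List (String × List (Int × Int))) (word : String) (ws : List (List Int)) :
    (if !(PySem.Dict.mk indices).contains word then ws
     else ((PySem.Dict.mk indices).getD word []).foldl pvStepA ws)
    = ((PySem.Dict.mk indices).getD word []).foldl pvStepA ws := by
  cases hc : (PySem.Dict.mk indices).contains word
  · rw [PySem.Dict.getD_of_not_contains _ _ hc]
    simp
  · simp

lemma pvFoldWords (indices : List (String × List (Int × Int))) (n : Int) (ws : List String) (g : Int → Int)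
    (h : ∀ w ∈ ws, ∀ p ∈ (PySem.Dict.mk indices).getD w ([] : List (Int × Int)), 0 ≤ p.1 ∧ p.1 ≤ n) :
    ws.foldl (fun t word =>
        if !(PySem.Dict.mk indices).contains word then t
        else ((PySem.Dict.mk indices).getD word []).foldl pvStepA t) (pvCanon n g)
      = pvCanon n (fun i => g i + pvScoreW indices ws i) := by
  induction ws generalizing g with
  | nil => simp [pvScoreW]
  | cons hd tl ih =>
    rw [List.foldl_cons, pvBodyA,
      pvFoldDocs n _ g (h hd (by simp)),
      ih _ (fun w hw => h w (by simp [hw]))]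
    unfold pvCanon
    apply List.map_congr_left
    intro i _
    simp [pvScoreW, add_assoc]

lemma pvAltInner (indices : List (String × List (Int × Int))) (ws : List String) (i : Int) :
    ws.foldl (fun acc word =>
        acc + ((PySem.Dict.mk indices).getD word []).foldl
            (fun s p => if p.1 = i then s + p.2 else s) 0) 0
      = pvScoreW indices ws i := by
  have h : (fun (acc : Int) (word : String) =>
        acc + ((PySem.Dict.mk indices).getD word []).foldl
            (fun s p => if p.1 = i then s + p.2 else s) 0)
      = fun acc word => acc + pvScore1 ((PySem.Dict.mk indices).getD word []) i := by
    funext acc word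
    rw [pvScore1_foldl]; ring
  rw [h, pvScoreW, PySem.List.foldl_add, zero_add]

-- ===== VERDICT (by name: the statement is the Claim_ definition above) =====
theorem find_documents_spec : Claim_equal_find_documents := by
  intro indices request doc_amount _hdom hpre
  unfold Spec_find_documents find_documents find_documents_alt
  have hb : ∀ w ∈ PySem.Set.ofList (PySem.Str.split₀ (PySem.Str.strip request)),
      ∀ p ∈ (PySem.Dict.mk indices).getD w ([] : List (Int × Int)), 0 ≤ p.1 ∧ p.1 ≤ doc_amount := by
    intro w hw
    exact hpre w ((PySem.Set.mem_ofList _ _).mp hw)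
  have hA := pvFoldWords indices doc_amount
    (PySem.Set.ofList (PySem.Str.split₀ (PySem.Str.strip request))) (fun _ => 0) hb
  simp only [show (fun i => [i, (0 : Int)]) = (fun i => [i, (fun _ : Int => (0:Int)) i]) from rfl]
  rw [show ((PySem.List.pyRange 0 (doc_amount + 1)).map (fun i => [i, (fun _ : Int => (0:Int)) i]))
      = pvCanon doc_amount (fun _ => 0) from rfl, hA]
  unfold pvCanon
  apply List.map_congr_left
  intro i _
  rw [pvAltInner]
  simp
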